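-- pv_equiv track=rewrite | github.com/VyoJ/SahayakAI | backend/voice_interface.py | is_api_rate_limit_error
-- ===== SOURCE A (Python) =====
-- def is_api_rate_limit_error(error_message: str) -> bool:
--     """
--     Check if the error is a rate limiting error that should trigger a retry.
--
--     Args:
--         error_message (str): Error message to check
--
--     Returns:
--         bool: True if it's a rate limiting error
--     """
--     rate_limit_indicators = [
--         "429",
--         "rate limit",
--         "too many requests",
--         "too many tokens",
--         "quota exceeded",
--         "throttle",
--         "billing",
--         "rate_limit",
--     ]
--
--     error_lower = error_message.lower()
--     return any(indicator in error_lower for indicator in rate_limit_indicators)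
-- ===== SOURCE B (Python) =====
-- def is_api_rate_limit_error(error_message: str) -> bool:
--     """
--     Check if the error is a rate limiting error that should trigger a retry.
--     Single left-to-right scan: at each position of the lowercased message,
--     test whether one of the literal indicators starts there.
--     """
--     indicators = (
--         "429",
--         "rate limit",
--         "too many requests",
--         "too many tokens",
--         "quota exceeded",
--         "throttle",
--         "billing",
--         "rate_limit",
--     )
--     s = error_message.lower()
--     for j in range(len(s)):
--         for ind in indicators:
--             if s.startswith(ind, j):
--                 return True
--     return False
-- ===== Notes on version B (the rewrite author's own statement) =====
-- stated objective: alternative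
-- what changed: Replaces eight independent substring searches ('in' per indicator) with one left-to-right scan over the lowercased message that tests at each position whether any indicator starts there.
import Mathlib
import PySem

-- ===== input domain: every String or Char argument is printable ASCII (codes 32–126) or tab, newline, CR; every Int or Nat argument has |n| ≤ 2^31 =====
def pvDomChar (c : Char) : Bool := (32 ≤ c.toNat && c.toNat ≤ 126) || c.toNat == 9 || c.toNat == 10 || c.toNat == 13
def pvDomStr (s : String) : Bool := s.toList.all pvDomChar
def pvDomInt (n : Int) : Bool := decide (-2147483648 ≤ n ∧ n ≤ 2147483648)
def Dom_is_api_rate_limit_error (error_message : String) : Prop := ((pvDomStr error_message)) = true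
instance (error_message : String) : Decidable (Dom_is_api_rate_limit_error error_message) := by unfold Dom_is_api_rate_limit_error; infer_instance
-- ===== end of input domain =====

-- B replaces eight independent substring searches with one left-to-right scan of the
-- lowercased message testing at each position whether any indicator starts there (alternative, same cost).
-- ===== PORT A =====
def is_api_rate_limit_error (error_message : String) : Bool :=
  let rate_limit_indicators : List String :=
    ["429", "rate limit", "too many requests", "too many tokens",
     "quota exceeded", "throttle", "billing", "rate_limit"]
  let error_lower := PySem.Str.lower error_message
  rate_limit_indicators.any (fun indicator => PySem.Str.isIn indicator error_lower)

-- ===== PORT B =====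
def pvIndicators : List (List Char) :=
  ["429".toList, "rate limit".toList, "too many requests".toList, "too many tokens".toList,
   "quota exceeded".toList, "throttle".toList, "billing".toList, "rate_limit".toList]

-- the scan loop of Source B: at each suffix, does some indicator start here?
def pvScan : List Char → Bool
  | [] => false
  | c :: rest => pvIndicators.any (fun ind => PySem.Chars.startswith (c :: rest) ind) || pvScan rest

def is_api_rate_limit_error_alt (error_message : String) : Bool :=
  pvScan (PySem.Str.lower error_message).toList

-- ===== PRECONDITION & SPEC =====
def Spec_is_api_rate_limit_error (error_message : String) (out : Bool) : Prop := out = is_api_rate_limit_error_alt error_message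
instance (error_message : String) (out : Bool) : Decidable (Spec_is_api_rate_limit_error error_message out) := by unfold Spec_is_api_rate_limit_error; infer_instance

-- ===== CLAIM (what is proved, stated in full; the proofs are below) =====
def Claim_equal_is_api_rate_limit_error : Prop := ∀ (error_message : String), Dom_is_api_rate_limit_error error_message → Spec_is_api_rate_limit_error error_message (is_api_rate_limit_error error_message)

-- ===== LEMMAS AND PROOFS =====

theorem pvIndicators_ne_nil : ∀ ind ∈ pvIndicators, ind ≠ [] := by decide

theorem pvScan_iff (l : List Char) :
    pvScan l = true ↔ ∃ ind ∈ pvIndicators, ∃ j, ind <+: l.drop j := by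
  induction l with
  | nil =>
    simp only [pvScan, List.drop_nil, List.prefix_nil]
    constructor
    · intro h; exact absurd h (by decide)
    · rintro ⟨ind, hmem, _, rfl⟩; exact absurd rfl (pvIndicators_ne_nil _ hmem)
  | cons c rest ih =>
    simp only [pvScan, Bool.or_eq_true, List.any_eq_true, PySem.Chars.startswith_iff, ih]
    constructor
    · rintro (⟨ind, hmem, hpre⟩ | ⟨ind, hmem, j, hpre⟩)
      · exact ⟨ind, hmem, 0, hpre⟩
      · exact ⟨ind, hmem, j + 1, by simpa using hpre⟩
    · rintro ⟨ind, hmem, j, hpre⟩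
      cases j with
      | zero => exact Or.inl ⟨ind, hmem, by simpa using hpre⟩
      | succ j => exact Or.inr ⟨ind, hmem, j, by simpa using hpre⟩

theorem ports_agree (l : List Char) :
    (pvIndicators.any (fun ind => PySem.Chars.isIn ind l)) = pvScan l := by
  cases h : pvScan l
  · rw [Bool.eq_false_iff]
    intro hany
    rw [List.any_eq_true] at hany
    obtain ⟨ind, hmem, hin⟩ := hany
    have hj := (PySem.Chars.exists_prefix_drop_iff_isIn ind l).2 hin
    have := (pvScan_iff l).2 ⟨ind, hmem, hj⟩
    simp [h] at this
  · obtain ⟨ind, hmem, hj⟩ := (pvScan_iff l).1 h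
    rw [List.any_eq_true]
    exact ⟨ind, hmem, (PySem.Chars.exists_prefix_drop_iff_isIn ind l).1 hj⟩

-- ===== VERDICT (by name: the statement is the Claim_ definition above) =====
theorem is_api_rate_limit_error_spec : Claim_equal_is_api_rate_limit_error := by
  intro s _
  unfold Spec_is_api_rate_limit_error
  show is_api_rate_limit_error s = is_api_rate_limit_error_alt s
  unfold is_api_rate_limit_error is_api_rate_limit_error_alt
  rw [← ports_agree]
  simp [pvIndicators, PySem.Str.isIn]
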